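-- pv_equiv track=rewrite | github.com/FuegoFro/KeepTalkingBot | src/modules/password_solution.py | _get_letter_combinations
-- ===== SOURCE A (Python) =====
-- def _get_letter_combinations(letter_cols, current_col, current_letters):
--     if current_col >= len(letter_cols):
--         yield "".join(current_letters)
--         return
--     for letter in letter_cols[current_col]:
--         current_letters.append(letter)
--         for result in _get_letter_combinations(letter_cols, current_col + 1, current_letters):
--             yield result
--         current_letters.pop()
-- ===== SOURCE B (Python) =====
-- def _get_letter_combinations(letter_cols, current_col, current_letters):
--     prefix = "".join(current_letters)
--     suffixes = [""]
--     for col in reversed(letter_cols[current_col:]):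
--         suffixes = [letter + suffix for letter in col for suffix in suffixes]
--     for suffix in suffixes:
--         yield prefix + suffix
-- ===== Notes on version B (the rewrite author's own statement) =====
-- stated objective: simpler
-- what changed: Replaces the recursive generator with append/pop prefix mutation by a flat back-to-front fold building the suffix product of letter_cols[current_col:], then mapping the joined prefix over it.
-- outside the precondition, e.g. on _get_letter_combinations([['a'], ['b']], -1, []): A returns ['bab'], B returns ['b']; on _get_letter_combinations([['a']], -5, []): A raises IndexError, B returns ['a']
import Mathlib
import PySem

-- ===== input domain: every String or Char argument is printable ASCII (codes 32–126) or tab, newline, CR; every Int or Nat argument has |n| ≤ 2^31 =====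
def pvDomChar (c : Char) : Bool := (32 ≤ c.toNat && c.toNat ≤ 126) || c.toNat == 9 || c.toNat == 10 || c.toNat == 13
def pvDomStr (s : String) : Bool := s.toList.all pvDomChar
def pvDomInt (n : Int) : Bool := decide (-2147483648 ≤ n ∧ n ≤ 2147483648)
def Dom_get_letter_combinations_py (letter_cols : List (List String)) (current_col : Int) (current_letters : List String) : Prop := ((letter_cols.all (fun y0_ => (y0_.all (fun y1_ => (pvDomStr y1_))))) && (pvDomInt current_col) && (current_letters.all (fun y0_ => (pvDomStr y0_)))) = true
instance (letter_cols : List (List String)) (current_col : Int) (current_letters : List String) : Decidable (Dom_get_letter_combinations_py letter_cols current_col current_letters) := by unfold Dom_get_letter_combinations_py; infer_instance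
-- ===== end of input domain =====

-- B replaces A's recursive generator (with transient append/pop mutation of current_letters)
-- by one flat back-to-front product construction over the column suffix; objective: simpler.
-- A mutates current_letters transiently during iteration (net state after exhaustion is unchanged);
-- the equivalence proved here is about the sequence of yielded values.

-- ===== PORT A =====
-- A's recursion, with the Python recursion on current_col; the append/pop maintenance of
-- current_letters becomes passing current_letters ++ [letter] to the recursive call (same value).
def get_letter_combinations_go (letter_cols : List (List String)) (current_col : Nat) (current_letters : List String) : List String :=
  if _h : current_col ≥ letter_cols.length then
    [PySem.Str.join "" current_letters]
  else
    (letter_cols[current_col]'(by omega)).flatMap (fun letter =>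
      get_letter_combinations_go letter_cols (current_col + 1) (current_letters ++ [letter]))
termination_by letter_cols.length - current_col

-- faithful for 0 ≤ current_col (all of Pre_); Python's negative-index behaviour is excluded by Pre_
def get_letter_combinations_py (letter_cols : List (List String)) (current_col : Int) (current_letters : List String) : List String :=
  get_letter_combinations_go letter_cols current_col.toNat current_letters

-- ===== PORT B =====
def get_letter_combinations_py_alt (letter_cols : List (List String)) (current_col : Int) (current_letters : List String) : List String :=
  let pfx := PySem.Str.join "" current_letters
  let suffixes := ((PySem.List.slice letter_cols (some current_col) none).reverse).foldl
    (fun suffixes col => col.flatMap (fun letter => suffixes.map (fun suffix => letter ++ suffix))) [""]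
  suffixes.map (fun suffix => pfx ++ suffix)

-- ===== PRECONDITION & SPEC =====
-- Pre_ excludes negative current_col: there Python's negative indexing makes A revisit columns by
-- wraparound (or raise IndexError below -len), outside the helper's natural domain of column indices.
def Pre_get_letter_combinations_py (letter_cols : List (List String)) (current_col : Int) (current_letters : List String) : Prop :=
  0 ≤ current_col
instance (letter_cols : List (List String)) (current_col : Int) (current_letters : List String) : Decidable (Pre_get_letter_combinations_py letter_cols current_col current_letters) := by unfold Pre_get_letter_combinations_py; infer_instance

def pvWitness_get_letter_combinations_py : List (List String) × Int × List String := ([["a", "b"], ["c"]], 0, ["p"])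

def Spec_get_letter_combinations_py (letter_cols : List (List String)) (current_col : Int) (current_letters : List String) (out : List String) : Prop := out = get_letter_combinations_py_alt letter_cols current_col current_letters
instance (letter_cols : List (List String)) (current_col : Int) (current_letters : List String) (out : List String) : Decidable (Spec_get_letter_combinations_py letter_cols current_col current_letters out) := by unfold Spec_get_letter_combinations_py; infer_instance

-- ===== CLAIM (what is proved, stated in full; the proofs are below) =====
def Claim_equal_get_letter_combinations_py : Prop := ∀ (letter_cols : List (List String)) (current_col : Int) (current_letters : List String), Dom_get_letter_combinations_py letter_cols current_col current_letters → Pre_get_letter_combinations_py letter_cols current_col current_letters → Spec_get_letter_combinations_py letter_cols current_col current_letters (get_letter_combinations_py letter_cols current_col current_letters)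

-- ===== LEMMAS AND PROOFS =====

-- the cartesian suffix product, front-to-back (proof-side characterisation of both programs)
def pvProdSuffixes : List (List String) → List String
  | [] => [""]
  | c :: cs => c.flatMap (fun l => (pvProdSuffixes cs).map (fun s => l ++ s))

theorem pv_join_eq_flatten (css : List (List Char)) : PySem.Chars.join [] css = css.flatten := by
  simp [PySem.Chars.join, List.intercalate]
  induction css with
  | nil => rfl
  | cons h t ih => cases t <;> simp_all [List.intersperse]

theorem pv_join_snoc (xs : List String) (x : String) :
    PySem.Str.join "" (xs ++ [x]) = PySem.Str.join "" xs ++ x := by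
  simp [PySem.Str.join, pv_join_eq_flatten]

-- B's foldl over the reversed column list builds exactly the front-to-back product
theorem pv_foldl_rev_eq_prod (ls : List (List String)) :
    (ls.reverse).foldl
      (fun suffixes col => col.flatMap (fun letter => suffixes.map (fun suffix => letter ++ suffix))) [""]
    = pvProdSuffixes ls := by
  rw [List.foldl_reverse]
  induction ls with
  | nil => rfl
  | cons h t ih => simp only [List.foldr_cons, ih, pvProdSuffixes]

-- A's recursion computes the joined prefix mapped over the suffix product of the remaining columns
theorem pv_go_eq (letter_cols : List (List String)) (current_col : Nat) (current_letters : List String) :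
    get_letter_combinations_go letter_cols current_col current_letters
      = (pvProdSuffixes (letter_cols.drop current_col)).map
          (fun s => PySem.Str.join "" current_letters ++ s) := by
  fun_induction get_letter_combinations_go letter_cols current_col current_letters with
  | case1 _ _ h =>
    rw [List.drop_eq_nil_of_le (by omega)]
    simp [pvProdSuffixes]
  | case2 n cur h ih =>
    rw [List.drop_eq_getElem_cons (by omega)]
    simp only [pvProdSuffixes, List.map_flatMap]
    refine List.flatMap_congr (fun l hl => ?_)
    rw [ih l]
    simp [pv_join_snoc, String.append_assoc]

-- ===== VERDICT (by name: the statement is the Claim_ definition above) =====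
theorem get_letter_combinations_py_spec : Claim_equal_get_letter_combinations_py := by
  intro letter_cols current_col current_letters _ hpre
  unfold Spec_get_letter_combinations_py get_letter_combinations_py get_letter_combinations_py_alt
  rw [PySem.List.slice_from letter_cols hpre, pv_foldl_rev_eq_prod, pv_go_eq]
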